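-- pv_equiv track=rewrite | github.com/bXnxme/crypto-bot | src/telegram_bot.py | _split_symbol_guess
-- ===== SOURCE A (Python) =====
-- def _split_symbol_guess(symbol: str) -> tuple[str, str]:
--     s = (symbol or "").strip().upper()
--     if not s:
--         return "", ""
--
--     quote_assets = (
--         "FDUSD",
--         "USDT",
--         "USDC",
--         "USDP",
--         "TUSD",
--         "BUSD",
--         "BTC",
--         "ETH",
--         "BNB",
--         "TRY",
--         "EUR",
--         "GBP",
--         "RUB",
--         "JPY",
--     )
--     for quote in quote_assets:
--         if s.endswith(quote) and len(s) > len(quote):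
--             return s[: -len(quote)], quote
--     if len(s) > 4:
--         return s[:-4], s[-4:]
--     return s, ""
-- ===== SOURCE B (Python) =====
-- def _split_symbol_guess(symbol: str) -> tuple[str, str]:
--     s = (symbol or "").strip().upper()
--     if not s:
--         return "", ""
--
--     quote_assets = ("FDUSD", "USDT", "USDC", "USDP", "TUSD", "BUSD", "BTC",
--                     "ETH", "BNB", "TRY", "EUR", "GBP", "RUB", "JPY")
--     # Automaton states: the non-empty suffixes of the quotes; accepting states: the quotes.
--     partial = set()
--     for q in quote_assets:
--         for i in range(1, len(q) + 1):
--             partial.add(q[len(q) - i:])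
--     full = set(quote_assets)
--
--     # Walk backwards, growing the candidate suffix one character at a time and
--     # pruning as soon as it can no longer extend to any quote.  No quote is a
--     # proper suffix of another, so the first accepting state hit is the only one.
--     p = ""
--     for ch in reversed(s):
--         p = ch + p
--         if p not in partial:
--             break
--         if p in full and len(p) < len(s):
--             return s[:-len(p)], p
--     return (s[:-4], s[-4:]) if len(s) > 4 else (s, "")
-- ===== Notes on version B (the rewrite author's own statement) =====
-- stated objective: alternative
-- what changed: Replaces the scan over 14 whole quote strings (one endswith test each) with a backward character-by-character automaton walk: the candidate suffix grows one char at a time through the set of quote suffixes, returning at the first full quote hit and pruning as soon as the suffix can extend to no quote; correct because no quote is a proper suffix of another.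
import Mathlib
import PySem

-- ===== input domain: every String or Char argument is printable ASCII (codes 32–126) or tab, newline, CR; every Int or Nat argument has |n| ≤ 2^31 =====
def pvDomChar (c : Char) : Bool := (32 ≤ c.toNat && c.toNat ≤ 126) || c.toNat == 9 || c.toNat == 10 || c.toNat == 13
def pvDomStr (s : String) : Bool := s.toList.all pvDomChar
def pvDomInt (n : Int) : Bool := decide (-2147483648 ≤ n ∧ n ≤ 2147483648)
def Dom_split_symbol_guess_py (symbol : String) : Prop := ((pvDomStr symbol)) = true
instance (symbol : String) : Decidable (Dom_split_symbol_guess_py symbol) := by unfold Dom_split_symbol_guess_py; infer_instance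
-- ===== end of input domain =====

-- B replaces A's scan over 14 whole quote strings (one endswith per quote) by a backward
-- character-by-character automaton walk: the candidate suffix grows one char at a time
-- through the set of quote suffixes and stops at the first accepting state (a full quote)
-- or as soon as it can no longer extend to any quote; same preprocessing and fallback.
-- Equal because no quote is a proper suffix of another, so at most one quote can match.

-- ===== PORT A =====
def pvQuoteAssets : List String :=
  ["FDUSD", "USDT", "USDC", "USDP", "TUSD", "BUSD",
   "BTC", "ETH", "BNB", "TRY", "EUR", "GBP", "RUB", "JPY"]

-- the 'for quote in quote_assets' loop, then the code after the loop
def pvGuessLoopA (s : String) : List String → String × String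
  | [] =>
    if 4 < PySem.Str.len s then
      (PySem.Str.slice s none (some (-4)), PySem.Str.slice s (some (-4)) none)
    else (s, "")
  | quote :: rest =>
    if PySem.Str.endswith s quote = true ∧ PySem.Str.len quote < PySem.Str.len s then
      (PySem.Str.slice s none (some (-(PySem.Str.len quote))), quote)
    else pvGuessLoopA s rest

def split_symbol_guess_py (symbol : String) : String × String :=
  -- '(symbol or "")': the only falsy str is "", so this is 'if symbol = "" then "" else symbol'
  let s := PySem.Str.upper (PySem.Str.strip (if symbol = "" then "" else symbol))
  if s = "" then ("", "")
  else pvGuessLoopA s pvQuoteAssets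

-- ===== PORT B =====
def pvQuoteAssetsB : List String :=
  ["FDUSD", "USDT", "USDC", "USDP", "TUSD", "BUSD",
   "BTC", "ETH", "BNB", "TRY", "EUR", "GBP", "RUB", "JPY"]

-- the two set-building loops: 'for q: for i in range(1, len(q)+1): partial.add(q[len(q)-i:])'
def pvPartial : PySem.Set String :=
  pvQuoteAssetsB.foldl
    (fun acc q =>
      (PySem.List.pyRange 1 (PySem.Str.len q + 1) 1).foldl
        (fun acc2 i => PySem.Set.add acc2 (PySem.Str.slice q (some (PySem.Str.len q - i)) none))
        acc)
    PySem.Set.empty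

def pvFull : PySem.Set String := PySem.Set.ofList pvQuoteAssetsB

-- the code after the 'for ch in reversed(s)' loop (reached by exhaustion or break)
def pvAfterB (s : String) : String × String :=
  if 4 < PySem.Str.len s then
    (PySem.Str.slice s none (some (-4)), PySem.Str.slice s (some (-4)) none)
  else (s, "")

-- the 'for ch in reversed(s)' loop; the accumulator p is kept as a list of chars,
-- 'p = ch + p' is 'ch :: p' (exact for Python strings on this domain)
def pvWalkB (s : String) : List Char → List Char → String × String
  | [], _ => pvAfterB s
  | ch :: rest, p =>
    let p' := ch :: p
    if PySem.Set.contains pvPartial (String.ofList p') = false then pvAfterB s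
    else if PySem.Set.contains pvFull (String.ofList p') = true ∧
        PySem.Str.len (String.ofList p') < PySem.Str.len s then
      (PySem.Str.slice s none (some (-(PySem.Str.len (String.ofList p')))), String.ofList p')
    else pvWalkB s rest p'

def split_symbol_guess_py_alt (symbol : String) : String × String :=
  let s := PySem.Str.upper (PySem.Str.strip (if symbol = "" then "" else symbol))
  if s = "" then ("", "")
  else pvWalkB s s.toList.reverse []

-- ===== PRECONDITION & SPEC =====
def Spec_split_symbol_guess_py (symbol : String) (out : String × String) : Prop := out = split_symbol_guess_py_alt symbol
instance (symbol : String) (out : String × String) : Decidable (Spec_split_symbol_guess_py symbol out) := by unfold Spec_split_symbol_guess_py; infer_instance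

-- ===== CLAIM (what is proved, stated in full; the proofs are below) =====
def Claim_equal_split_symbol_guess_py : Prop := ∀ (symbol : String), Dom_split_symbol_guess_py symbol → Spec_split_symbol_guess_py symbol (split_symbol_guess_py symbol)

-- ===== LEMMAS AND PROOFS =====

-- 'quote L matches': the last L chars of s form a quote and s is strictly longer
def pvC (s : String) (L : Nat) : Prop :=
  L < s.toList.length ∧ String.ofList (s.toList.drop (s.toList.length - L)) ∈ pvQuoteAssetsB

-- contains on the two literal sets is list membership
theorem pv_contains_full (x : String) :
    PySem.Set.contains pvFull x = true ↔ x ∈ pvQuoteAssetsB := by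
  simp [pvFull, PySem.Set.contains, PySem.Set.mem_ofList]

-- every non-empty suffix of a quote is a state of the automaton
set_option maxRecDepth 100000 in
theorem pv_suffix_closed : ∀ q ∈ pvQuoteAssetsB, ∀ j ∈ List.range q.toList.length,
    PySem.Set.contains pvPartial (String.ofList (q.toList.drop j)) = true := by decide

-- no proper suffix of a quote is itself a quote
set_option maxRecDepth 100000 in
theorem pv_suffix_free : ∀ q ∈ pvQuoteAssetsB, ∀ j ∈ List.range q.toList.length, j ≠ 0 →
    PySem.Set.contains pvFull (String.ofList (q.toList.drop j)) = false := by decide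

-- quote lengths are 3, 4 or 5
theorem pv_quote_len : ∀ q ∈ pvQuoteAssetsB,
    q.toList.length = 3 ∨ q.toList.length = 4 ∨ q.toList.length = 5 := by decide

theorem pvC_len {s : String} {L : Nat} (h : pvC s L) : L = 3 ∨ L = 4 ∨ L = 5 := by
  obtain ⟨hn, hm⟩ := h
  have hsl : s.toList.length = s.length := by simp
  have hq := pv_quote_len _ hm
  simp only [String.toList_ofList, List.length_drop] at hq
  omega

theorem pvC_unique_lt {s : String} {K L : Nat} (hK : pvC s K) (hL : pvC s L)
    (hlt : K < L) : False := by
  obtain ⟨hnK, hmK⟩ := hK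
  obtain ⟨hnL, hmL⟩ := hL
  have hdrop : s.toList.drop (s.toList.length - K) =
      (String.ofList (s.toList.drop (s.toList.length - L))).toList.drop (L - K) := by
    simp only [String.toList_ofList]
    rw [List.drop_drop]
    congr 1
    omega
  have hqlen : (String.ofList (s.toList.drop (s.toList.length - L))).toList.length = L := by
    simp only [String.toList_ofList, List.length_drop]
    omega
  have hK345 := pvC_len (⟨hnK, hmK⟩ : pvC s K)
  have hfree := pv_suffix_free _ hmL (L - K)
    (by rw [List.mem_range, hqlen]; omega) (by omega)
  rw [← hdrop] at hfree
  have htrue := (pv_contains_full _).mpr hmK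
  rw [htrue] at hfree
  exact absurd hfree (by simp)

theorem pvC_unique {s : String} {K L : Nat} (hK : pvC s K) (hL : pvC s L) : K = L := by
  rcases Nat.lt_trichotomy K L with h | h | h
  · exact absurd (pvC_unique_lt hK hL h) (by simp)
  · exact h
  · exact absurd (pvC_unique_lt hL hK h) (by simp)

-- ---- B-side characterisation ----

-- completeness: if quote q matches, the walk returns the split at q
theorem pv_walk_complete (s q : String) (hq : q ∈ pvQuoteAssetsB)
    (hn : q.toList.length < s.toList.length)
    (hsuf : s.toList.drop (s.toList.length - q.toList.length) = q.toList) :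
    ∀ rest p, rest.reverse ++ p = s.toList → p.length < q.toList.length →
      p = q.toList.drop (q.toList.length - p.length) →
      pvWalkB s rest p =
        (PySem.Str.slice s none (some (-(q.toList.length : Int))), q) := by
  intro rest
  induction rest with
  | nil =>
    intro p hinv hlt _
    exfalso
    have : p.length = s.toList.length := by rw [← hinv]; simp
    omega
  | cons ch rest ih =>
    intro p hinv hlt hp
    rw [pvWalkB]
    have hinv' : rest.reverse ++ (ch :: p) = s.toList := by
      rw [← hinv, List.reverse_cons, List.append_assoc]
      rfl
    have hdrop : s.toList.drop (s.toList.length - (p.length + 1)) = ch :: p := by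
      rw [← hinv']
      have hlen : (rest.reverse ++ (ch :: p)).length = rest.reverse.length + (p.length + 1) := by
        simp
      rw [hlen, Nat.add_sub_cancel]
      simp
    have hq2s : q.toList.drop (q.toList.length - (p.length + 1)) =
        s.toList.drop (s.toList.length - (p.length + 1)) := by
      have h1 : (s.toList.drop (s.toList.length - q.toList.length)).drop
          (q.toList.length - (p.length + 1)) =
          s.toList.drop (s.toList.length - (p.length + 1)) := by
        rw [List.drop_drop]
        congr 1
        omega
      rw [hsuf] at h1
      exact h1
    have hp' : ch :: p = q.toList.drop (q.toList.length - (p.length + 1)) := by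
      rw [hq2s, hdrop]
    have hj : q.toList.length - (p.length + 1) ∈ List.range q.toList.length := by
      rw [List.mem_range]; omega
    have hc1 := pv_suffix_closed q hq _ hj
    rw [← hp'] at hc1
    rw [hc1]
    simp only [Bool.true_eq_false, if_false]
    by_cases hfin : p.length + 1 = q.toList.length
    · have hpq : ch :: p = q.toList := by
        rw [hp', hfin]
        simp
      rw [hpq]
      have hc2 := (pv_contains_full (String.ofList q.toList)).mpr (by simpa using hq)
      have hsl : s.toList.length = s.length := by simp
      have hql : q.toList.length = q.length := by simp
      rw [if_pos ⟨hc2, by simp [PySem.Str.len_eq]; omega⟩]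
      simp [PySem.Str.len_eq]
    · have hc3 := pv_suffix_free q hq _ hj (by omega)
      rw [← hp'] at hc3
      rw [if_neg (by rintro ⟨hf, _⟩; rw [hc3] at hf; exact Bool.false_ne_true hf)]
      exact ih (ch :: p) hinv' (by simp only [List.length_cons]; omega) (by simpa using hp')

-- soundness: if no quote matches, the walk falls through to the post-loop code
theorem pv_walk_miss (s : String) (h : ∀ L, ¬ pvC s L) :
    ∀ rest p, rest.reverse ++ p = s.toList → pvWalkB s rest p = pvAfterB s := by
  intro rest
  induction rest with
  | nil => intro p _; rfl
  | cons ch rest ih =>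
    intro p hinv
    rw [pvWalkB]
    by_cases hc : PySem.Set.contains pvPartial (String.ofList (ch :: p)) = false
    · rw [if_pos hc]
    · rw [if_neg hc]
      have hinv' : rest.reverse ++ (ch :: p) = s.toList := by
        rw [← hinv, List.reverse_cons, List.append_assoc]
        rfl
      rw [if_neg, ih (ch :: p) hinv']
      rintro ⟨hfull, hlen⟩
      have hmem : String.ofList (ch :: p) ∈ pvQuoteAssetsB := (pv_contains_full _).mp hfull
      have hsl : s.toList.length = s.length := by simp
      have hlen' : (ch :: p).length < s.toList.length := by
        simp only [PySem.Str.len_eq] at hlen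
        have h1 : (String.ofList (ch :: p)).toList.length = (ch :: p).length := by simp
        have h2 : (String.ofList (ch :: p)).length = (ch :: p).length := by
          rw [← h1]; simp
        omega
      have hdrop : s.toList.drop (s.toList.length - (ch :: p).length) = ch :: p := by
        rw [← hinv']
        have hl : (rest.reverse ++ (ch :: p)).length =
            rest.reverse.length + (ch :: p).length := by simp
        rw [hl, Nat.add_sub_cancel]
        simp
      exact h (ch :: p).length ⟨hlen', by rw [hdrop]; exact hmem⟩

-- ---- A-side characterisation (block collapse of the scan) ----

-- endswith by a string of length L, under L ≤ len s, is the same as 'the last L chars equal it'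
theorem pv_endswith_slice_iff (s q : String) (L : Nat) (hL : 0 < L)
    (hq : q.toList.length = L) (_hn : L ≤ s.toList.length) :
    (PySem.Str.endswith s q = true) ↔ PySem.Str.slice s (some (-(L : Int))) none = q := by
  rw [PySem.Str.endswith_eq, PySem.Chars.endswith_iff]
  constructor
  · rintro ⟨t, ht⟩
    apply String.toList_inj.mp
    rw [PySem.Str.toList_slice, PySem.Chars.slice_eq_listSlice,
      PySem.List.slice_from_neg_natCast _ _ hL, ← ht]
    rw [List.length_append, hq]
    have hlt : t.length + L - L = t.length := by omega
    rw [hlt, List.drop_left]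
  · intro h
    have h' : s.toList.drop (s.toList.length - L) = q.toList := by
      rw [← congrArg String.toList h, PySem.Str.toList_slice, PySem.Chars.slice_eq_listSlice,
        PySem.List.slice_from_neg_natCast _ _ hL]
    rw [← h']
    exact List.drop_suffix _ _

-- one block of same-length quotes in A's scan collapses to one membership test
theorem pv_block (s : String) (L : Nat) (hL : 0 < L) (qs rest : List String)
    (h : ∀ q ∈ qs, q.toList.length = L) :
    pvGuessLoopA s (qs ++ rest) =
      if (L : Int) < PySem.Str.len s ∧
          PySem.Str.slice s (some (-(L : Int))) none ∈ qs then
        (PySem.Str.slice s none (some (-(L : Int))), PySem.Str.slice s (some (-(L : Int))) none)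
      else pvGuessLoopA s rest := by
  induction qs with
  | nil => simp
  | cons q qs' ih =>
    have hqL : q.toList.length = L := h q (by simp)
    have hlenq : PySem.Str.len q = (L : Int) := by rw [PySem.Str.len_eq, hqL]
    by_cases hn : (L : Int) < PySem.Str.len s
    · have hn2 : L ≤ s.toList.length := by
        rw [PySem.Str.len_eq] at hn; exact_mod_cast le_of_lt hn
      have hiff := pv_endswith_slice_iff s q L hL hqL hn2
      by_cases heq : PySem.Str.slice s (some (-(L : Int))) none = q
      · simp only [List.cons_append, pvGuessLoopA]
        rw [if_pos ⟨hiff.mpr heq, by rw [hlenq]; exact hn⟩,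
          if_pos ⟨hn, by simp [heq]⟩, hlenq, heq]
      · simp only [List.cons_append, pvGuessLoopA]
        rw [if_neg (by rintro ⟨he, _⟩; exact heq (hiff.mp he)),
          ih (fun q hq => h q (by simp [hq]))]
        by_cases hmem : PySem.Str.slice s (some (-(L : Int))) none ∈ qs'
        · rw [if_pos ⟨hn, hmem⟩, if_pos ⟨hn, by simp [hmem]⟩]
        · rw [if_neg (by rintro ⟨_, hm⟩; exact hmem hm),
            if_neg (by rintro ⟨_, hm⟩; rcases List.mem_cons.mp hm with h1 | h2
                       exacts [heq h1, hmem h2])]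
    · simp only [List.cons_append, pvGuessLoopA]
      rw [if_neg (by rintro ⟨_, hl⟩; rw [hlenq] at hl; exact hn hl),
        ih (fun q hq => h q (by simp [hq])),
        if_neg (by rintro ⟨hl, _⟩; exact hn hl),
        if_neg (by rintro ⟨hl, _⟩; exact hn hl)]

-- ---- bridge between the two condition forms ----

def pvQL (L : Nat) : List String := pvQuoteAssetsB.filter (fun q => q.toList.length = L)

theorem pv_slice_drop (s : String) (L : Nat) (hL : 0 < L) (hn : L ≤ s.toList.length) :
    PySem.Str.slice s (some (-(L : Int))) none =
      String.ofList (s.toList.drop (s.toList.length - L)) := by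
  apply String.toList_inj.mp
  rw [PySem.Str.toList_slice, PySem.Chars.slice_eq_listSlice,
    PySem.List.slice_from_neg_natCast _ _ hL]
  simp

theorem pvC_iff (s : String) (L : Nat) (hL : 0 < L) :
    pvC s L ↔ ((L : Int) < PySem.Str.len s ∧
      PySem.Str.slice s (some (-(L : Int))) none ∈ pvQL L) := by
  have hsl : s.toList.length = s.length := by simp
  constructor
  · rintro ⟨hn, hm⟩
    have hn' : (L : Int) < PySem.Str.len s := by rw [PySem.Str.len_eq]; exact_mod_cast hn
    refine ⟨hn', ?_⟩
    rw [pv_slice_drop s L hL (le_of_lt hn)]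
    rw [pvQL, List.mem_filter]
    refine ⟨hm, ?_⟩
    simp only [String.toList_ofList, List.length_drop, decide_eq_true_eq]
    omega
  · rintro ⟨hn, hm⟩
    have hn' : L < s.toList.length := by
      rw [PySem.Str.len_eq] at hn; exact_mod_cast hn
    refine ⟨hn', ?_⟩
    rw [pv_slice_drop s L hL (le_of_lt hn')] at hm
    exact (List.mem_filter.mp hm).1

theorem pvC3_iff (s : String) : pvC s 3 ↔ ((3 : Int) < PySem.Str.len s ∧
    PySem.Str.slice s (some (-3)) none ∈ pvQL 3) := by
  have h := pvC_iff s 3 (by norm_num)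
  push_cast at h
  exact h

theorem pvC4_iff (s : String) : pvC s 4 ↔ ((4 : Int) < PySem.Str.len s ∧
    PySem.Str.slice s (some (-4)) none ∈ pvQL 4) := by
  have h := pvC_iff s 4 (by norm_num)
  push_cast at h
  exact h

theorem pvC5_iff (s : String) : pvC s 5 ↔ ((5 : Int) < PySem.Str.len s ∧
    PySem.Str.slice s (some (-5)) none ∈ pvQL 5) := by
  have h := pvC_iff s 5 (by norm_num)
  push_cast at h
  exact h

theorem pvQL5 : pvQL 5 = ["FDUSD"] := by decide
theorem pvQL4 : pvQL 4 = ["USDT", "USDC", "USDP", "TUSD", "BUSD"] := by decide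
theorem pvQL3 : pvQL 3 = ["BTC", "ETH", "BNB", "TRY", "EUR", "GBP", "RUB", "JPY"] := by decide

-- A's scan equals the chain of the three block tests
theorem pv_loopA_chain (s : String) :
    pvGuessLoopA s pvQuoteAssets =
      if (5 : Int) < PySem.Str.len s ∧ PySem.Str.slice s (some (-5)) none ∈ pvQL 5 then
        (PySem.Str.slice s none (some (-5)), PySem.Str.slice s (some (-5)) none)
      else if (4 : Int) < PySem.Str.len s ∧ PySem.Str.slice s (some (-4)) none ∈ pvQL 4 then
        (PySem.Str.slice s none (some (-4)), PySem.Str.slice s (some (-4)) none)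
      else if (3 : Int) < PySem.Str.len s ∧ PySem.Str.slice s (some (-3)) none ∈ pvQL 3 then
        (PySem.Str.slice s none (some (-3)), PySem.Str.slice s (some (-3)) none)
      else pvGuessLoopA s [] := by
  have h5 : pvQuoteAssets =
      ["FDUSD"] ++ (["USDT", "USDC", "USDP", "TUSD", "BUSD"] ++
        (["BTC", "ETH", "BNB", "TRY", "EUR", "GBP", "RUB", "JPY"] ++ [])) := by rfl
  rw [h5,
    pv_block s 5 (by norm_num) _ _ (by decide),
    pv_block s 4 (by norm_num) _ _ (by decide),
    pv_block s 3 (by norm_num) _ _ (by decide),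
    pvQL5, pvQL4, pvQL3]
  norm_num

theorem pv_afterA (s : String) : pvGuessLoopA s [] = pvAfterB s := rfl

-- main per-string lemma: the two loops agree
theorem pv_loops_eq (s : String) :
    pvGuessLoopA s pvQuoteAssets = pvWalkB s s.toList.reverse [] := by
  rw [pv_loopA_chain]
  by_cases hC : ∃ L, pvC s L
  · obtain ⟨L, hL⟩ := hC
    have hnot : ∀ K, K ≠ L → ¬ pvC s K := fun K hne hK => hne (pvC_unique hK hL)
    have hL345 := pvC_len hL
    have hL0 : 0 < L := by rcases hL345 with rfl | rfl | rfl <;> norm_num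
    obtain ⟨hn, hm⟩ := hL
    have hsl : s.toList.length = s.length := by simp
    have hqlen : (String.ofList (s.toList.drop (s.toList.length - L))).toList.length = L := by
      simp only [String.toList_ofList, List.length_drop]
      omega
    have hsuf : s.toList.drop (s.toList.length -
        (String.ofList (s.toList.drop (s.toList.length - L))).toList.length) =
        (String.ofList (s.toList.drop (s.toList.length - L))).toList := by
      rw [hqlen]
      simp
    have hwalk := pv_walk_complete s _ hm (by rw [hqlen]; exact hn) hsuf
      s.toList.reverse [] (by simp) (by rw [hqlen, List.length_nil]; omega) (by simp)
    rw [hqlen] at hwalk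
    have hsd := pv_slice_drop s L (by omega) (le_of_lt hn)
    rcases hL345 with rfl | rfl | rfl
    · push_cast at hwalk hsd
      rw [if_neg (fun hc => hnot 5 (by omega) ((pvC5_iff s).mpr hc)),
        if_neg (fun hc => hnot 4 (by omega) ((pvC4_iff s).mpr hc)),
        if_pos ((pvC3_iff s).mp ⟨hn, hm⟩), hwalk, hsd]
    · push_cast at hwalk hsd
      rw [if_neg (fun hc => hnot 5 (by omega) ((pvC5_iff s).mpr hc)),
        if_pos ((pvC4_iff s).mp ⟨hn, hm⟩), hwalk, hsd]
    · push_cast at hwalk hsd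
      rw [if_pos ((pvC5_iff s).mp ⟨hn, hm⟩), hwalk, hsd]
  · push_neg at hC
    rw [pv_walk_miss s hC s.toList.reverse [] (by simp)]
    rw [if_neg (fun hc => hC 5 ((pvC5_iff s).mpr hc)),
      if_neg (fun hc => hC 4 ((pvC4_iff s).mpr hc)),
      if_neg (fun hc => hC 3 ((pvC3_iff s).mpr hc)),
      pv_afterA]

-- ===== VERDICT (by name: the statement is the Claim_ definition above) =====
theorem split_symbol_guess_py_spec : Claim_equal_split_symbol_guess_py := by
  intro symbol _
  unfold Spec_split_symbol_guess_py split_symbol_guess_py split_symbol_guess_py_alt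
  by_cases h : PySem.Str.upper (PySem.Str.strip (if symbol = "" then "" else symbol)) = ""
  · simp only [h, if_pos]
  · simp only [h, if_false]
    exact pv_loops_eq _
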